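-- pv_equiv track=rewrite | github.com/eight-atulya/atulya | atulya-api/atulya_api/engine/code_intel/artifacts.py | _extract_leading_comment
-- ===== SOURCE A (Python) =====
-- def _extract_leading_comment(text: str, language: str | None) -> str:
--     lines = text.splitlines()
--     collected: list[str] = []
--     for line in lines:
--         stripped = line.strip()
--         if not stripped:
--             if collected:
--                 break
--             continue
--         if stripped.startswith("#"):
--             collected.append(stripped.lstrip("# ").strip())
--             continue
--         if stripped.startswith("//"):
--             collected.append(stripped.lstrip("/ ").strip())
--             continue
--         if stripped.startswith("/*"):
--             inner = stripped.lstrip("/* ").rstrip(" */")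
--             collected.append(inner.strip())
--             continue
--         if stripped.startswith("*"):
--             collected.append(stripped.lstrip("* ").strip())
--             continue
--         break
--     return " ".join(part for part in collected if part)[:600]
-- ===== SOURCE B (Python) =====
-- def _extract_leading_comment(text: str, language: str | None) -> str:
--     # Two-phase: locate the leading comment block (drop blanks, take comment
--     # lines), then map a normalizer over it; no stateful accumulate/break loop.
--     def is_comment(line: str) -> bool:
--         s = line.strip()
--         return bool(s) and (s.startswith("#") or s.startswith("//")
--                             or s.startswith("/*") or s.startswith("*"))
--
--     def normalize(line: str) -> str:
--         s = line.strip()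
--         if s.startswith("#"):
--             return s.lstrip("# ").strip()
--         if s.startswith("//"):
--             return s.lstrip("/ ").strip()
--         if s.startswith("/*"):
--             return s.lstrip("/* ").rstrip(" */").strip()
--         if s.startswith("*"):
--             return s.lstrip("* ").strip()
--         return s  # unreachable inside the block
--
--     def drop_while(pred, xs):
--         while xs and pred(xs[0]):
--             xs = xs[1:]
--         return xs
--
--     def take_while(pred, xs):
--         out = []
--         for x in xs:
--             if not pred(x):
--                 break
--             out.append(x)
--         return out
--
--     block = take_while(is_comment, drop_while(lambda l: not l.strip(), text.splitlines()))
--     return " ".join(p for p in map(normalize, block) if p)[:600]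
-- ===== Notes on version B (the rewrite author's own statement) =====
-- stated objective: alternative
-- what changed: Replaces A's single stateful scan (accumulator list with continue/break state) by a two-phase decomposition: drop leading blank lines, take the contiguous run of comment lines, then map a pure normalizer over that block and join.
import Mathlib
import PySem

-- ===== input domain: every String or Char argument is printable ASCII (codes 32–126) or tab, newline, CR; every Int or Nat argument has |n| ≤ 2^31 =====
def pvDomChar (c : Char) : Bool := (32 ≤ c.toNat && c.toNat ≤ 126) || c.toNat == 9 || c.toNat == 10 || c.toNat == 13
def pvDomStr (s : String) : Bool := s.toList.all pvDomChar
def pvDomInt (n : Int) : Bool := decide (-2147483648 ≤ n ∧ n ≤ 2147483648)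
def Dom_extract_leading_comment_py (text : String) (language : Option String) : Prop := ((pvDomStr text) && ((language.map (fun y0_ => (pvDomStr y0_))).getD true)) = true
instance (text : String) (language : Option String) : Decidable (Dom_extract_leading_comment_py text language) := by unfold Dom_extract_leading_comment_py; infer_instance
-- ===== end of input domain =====

-- B replaces A's stateful accumulate/break scan by a two-phase decomposition
-- (drop blank lines, take the comment block, map a normalizer); alternative, not faster.


-- ===== PORT A =====
-- s.lstrip(chars) / s.rstrip(chars): PySem has no charset lstrip/rstrip, ported by hand
-- (exact: Python removes leading/trailing characters that occur in `chars`).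
def pvLstrip (cs : List Char) (chars : List Char) : List Char :=
  cs.dropWhile (fun c => chars.contains c)

def pvRstrip (cs : List Char) (chars : List Char) : List Char :=
  (cs.reverse.dropWhile (fun c => chars.contains c)).reverse

-- A's for-loop over `lines` with the `collected` accumulator, branches in A's order.
def extrLoopA : List (List Char) → List (List Char) → List (List Char)
  | [], collected => collected
  | line :: rest, collected =>
    let stripped := PySem.Chars.strip line
    if stripped.isEmpty then
      if !collected.isEmpty then collected else extrLoopA rest collected
    else if PySem.Chars.startswith stripped ['#'] then
      extrLoopA rest (collected ++ [PySem.Chars.strip (pvLstrip stripped ['#', ' '])])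
    else if PySem.Chars.startswith stripped ['/', '/'] then
      extrLoopA rest (collected ++ [PySem.Chars.strip (pvLstrip stripped ['/', ' '])])
    else if PySem.Chars.startswith stripped ['/', '*'] then
      extrLoopA rest (collected ++ [PySem.Chars.strip (pvRstrip (pvLstrip stripped ['/', '*', ' ']) [' ', '*', '/'])])
    else if PySem.Chars.startswith stripped ['*'] then
      extrLoopA rest (collected ++ [PySem.Chars.strip (pvLstrip stripped ['*', ' '])])
    else collected

def extract_leading_comment_py (text : String) (language : Option String) : String :=
  let lines := PySem.Chars.splitlines text.toList
  let collected := extrLoopA lines []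
  String.ofList (PySem.List.slice (PySem.Chars.join [' '] (collected.filter (fun p => !p.isEmpty))) none (some 600))

-- ===== PORT B =====
def pvIsComment (line : List Char) : Bool :=
  let s := PySem.Chars.strip line
  !s.isEmpty && (PySem.Chars.startswith s ['#'] || PySem.Chars.startswith s ['/', '/'] ||
                 PySem.Chars.startswith s ['/', '*'] || PySem.Chars.startswith s ['*'])

def pvNormalize (line : List Char) : List Char :=
  let s := PySem.Chars.strip line
  if PySem.Chars.startswith s ['#'] then PySem.Chars.strip (pvLstrip s ['#', ' '])
  else if PySem.Chars.startswith s ['/', '/'] then PySem.Chars.strip (pvLstrip s ['/', ' '])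
  else if PySem.Chars.startswith s ['/', '*'] then
    PySem.Chars.strip (pvRstrip (pvLstrip s ['/', '*', ' ']) [' ', '*', '/'])
  else if PySem.Chars.startswith s ['*'] then PySem.Chars.strip (pvLstrip s ['*', ' '])
  else s

def pvDropWhile (p : List Char → Bool) : List (List Char) → List (List Char)
  | [] => []
  | x :: rest => if p x then pvDropWhile p rest else x :: rest

def pvTakeWhile (p : List Char → Bool) : List (List Char) → List (List Char)
  | [] => []
  | x :: rest => if p x then x :: pvTakeWhile p rest else []

def extract_leading_comment_py_alt (text : String) (language : Option String) : String :=
  let block := pvTakeWhile pvIsComment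
    (pvDropWhile (fun l => (PySem.Chars.strip l).isEmpty) (PySem.Chars.splitlines text.toList))
  String.ofList (PySem.List.slice (PySem.Chars.join [' '] ((block.map pvNormalize).filter (fun p => !p.isEmpty))) none (some 600))

-- ===== PRECONDITION & SPEC =====
def Spec_extract_leading_comment_py (text : String) (language : Option String) (out : String) : Prop := out = extract_leading_comment_py_alt text language
instance (text : String) (language : Option String) (out : String) : Decidable (Spec_extract_leading_comment_py text language out) := by unfold Spec_extract_leading_comment_py; infer_instance

-- ===== CLAIM (what is proved, stated in full; the proofs are below) =====
def Claim_equal_extract_leading_comment_py : Prop := ∀ (text : String) (language : Option String), Dom_extract_leading_comment_py text language → Spec_extract_leading_comment_py text language (extract_leading_comment_py text language)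

-- ===== LEMMAS AND PROOFS =====

-- Step equations for the recursive helpers (cited instead of unfolding the
-- recursive definitions inside simp, which loops on their eq_def form).
theorem extrLoopA_nil (c : List (List Char)) : extrLoopA [] c = c := rfl

theorem extrLoopA_cons (line : List Char) (rest : List (List Char)) (c : List (List Char)) :
    extrLoopA (line :: rest) c =
      (let stripped := PySem.Chars.strip line
       if stripped.isEmpty then
         if !c.isEmpty then c else extrLoopA rest c
       else if PySem.Chars.startswith stripped ['#'] then
         extrLoopA rest (c ++ [PySem.Chars.strip (pvLstrip stripped ['#', ' '])])
       else if PySem.Chars.startswith stripped ['/', '/'] then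
         extrLoopA rest (c ++ [PySem.Chars.strip (pvLstrip stripped ['/', ' '])])
       else if PySem.Chars.startswith stripped ['/', '*'] then
         extrLoopA rest (c ++ [PySem.Chars.strip (pvRstrip (pvLstrip stripped ['/', '*', ' ']) [' ', '*', '/'])])
       else if PySem.Chars.startswith stripped ['*'] then
         extrLoopA rest (c ++ [PySem.Chars.strip (pvLstrip stripped ['*', ' '])])
       else c) := rfl

theorem pvDropWhile_cons (p : List Char → Bool) (x : List Char) (rest : List (List Char)) :
    pvDropWhile p (x :: rest) = if p x then pvDropWhile p rest else x :: rest := rfl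

theorem pvTakeWhile_nil (p : List Char → Bool) : pvTakeWhile p [] = [] := rfl

theorem pvTakeWhile_cons (p : List Char → Bool) (x : List Char) (rest : List (List Char)) :
    pvTakeWhile p (x :: rest) = if p x then x :: pvTakeWhile p rest else [] := rfl

-- While `collected` is empty, A's loop skips exactly the leading blank lines.
theorem extrLoopA_dropBlanks (ls : List (List Char)) :
    extrLoopA ls [] = extrLoopA (pvDropWhile (fun l => (PySem.Chars.strip l).isEmpty) ls) [] := by
  induction ls with
  | nil => rfl
  | cons line rest ih =>
    by_cases h : (PySem.Chars.strip line).isEmpty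
    · simpa [extrLoopA_cons, pvDropWhile_cons, h] using ih
    · simp [pvDropWhile_cons, h]

-- Once `collected` is nonempty, A's remaining scan is B's takeWhile + map.
theorem extrLoopA_run (ls : List (List Char)) (acc : List (List Char)) (hacc : acc ≠ []) :
    extrLoopA ls acc = acc ++ (pvTakeWhile pvIsComment ls).map pvNormalize := by
  induction ls generalizing acc with
  | nil => simp [extrLoopA_nil, pvTakeWhile_nil]
  | cons line rest ih =>
    by_cases hb : (PySem.Chars.strip line).isEmpty
    · have hc : pvIsComment line = false := by simp [pvIsComment, hb]
      simp [extrLoopA_cons, pvTakeWhile_cons, hb, hc, hacc]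
    · by_cases h1 : PySem.Chars.startswith (PySem.Chars.strip line) ['#']
      · have hc : pvIsComment line = true := by simp [pvIsComment, hb, h1]
        simp [extrLoopA_cons, pvTakeWhile_cons, hb, h1, hc, pvNormalize,
          ih (acc ++ [PySem.Chars.strip (pvLstrip (PySem.Chars.strip line) ['#', ' '])]) (by simp)]
      · by_cases h2 : PySem.Chars.startswith (PySem.Chars.strip line) ['/', '/']
        · have hc : pvIsComment line = true := by simp [pvIsComment, hb, h2]
          simp [extrLoopA_cons, pvTakeWhile_cons, hb, h1, h2, hc, pvNormalize,
            ih (acc ++ [PySem.Chars.strip (pvLstrip (PySem.Chars.strip line) ['/', ' '])]) (by simp)]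
        · by_cases h3 : PySem.Chars.startswith (PySem.Chars.strip line) ['/', '*']
          · have hc : pvIsComment line = true := by simp [pvIsComment, hb, h3]
            simp [extrLoopA_cons, pvTakeWhile_cons, hb, h1, h2, h3, hc, pvNormalize,
              ih (acc ++ [PySem.Chars.strip (pvRstrip (pvLstrip (PySem.Chars.strip line) ['/', '*', ' ']) [' ', '*', '/'])]) (by simp)]
          · by_cases h4 : PySem.Chars.startswith (PySem.Chars.strip line) ['*']
            · have hc : pvIsComment line = true := by simp [pvIsComment, hb, h4]
              simp [extrLoopA_cons, pvTakeWhile_cons, hb, h1, h2, h3, h4, hc, pvNormalize,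
                ih (acc ++ [PySem.Chars.strip (pvLstrip (PySem.Chars.strip line) ['*', ' '])]) (by simp)]
            · have hc : pvIsComment line = false := by simp [pvIsComment, hb, h1, h2, h3, h4]
              simp [extrLoopA_cons, pvTakeWhile_cons, hb, h1, h2, h3, h4, hc]

-- After the blanks are dropped, the head (if any) is nonblank.
theorem pvDropWhile_head (p : List Char → Bool) (ls : List (List Char)) :
    pvDropWhile p ls = [] ∨ ∃ x rest, pvDropWhile p ls = x :: rest ∧ p x = false := by
  induction ls with
  | nil => exact Or.inl rfl
  | cons x rest ih =>
    by_cases h : p x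
    · simpa [pvDropWhile_cons, h] using ih
    · exact Or.inr ⟨x, rest, by simp [pvDropWhile_cons, h], by simp [h]⟩

-- A's whole loop equals B's block computation.
theorem extrLoopA_eq_block (lines : List (List Char)) :
    extrLoopA lines [] =
      (pvTakeWhile pvIsComment
        (pvDropWhile (fun l => (PySem.Chars.strip l).isEmpty) lines)).map pvNormalize := by
  rw [extrLoopA_dropBlanks]
  rcases pvDropWhile_head (fun l => (PySem.Chars.strip l).isEmpty) lines with h | ⟨x, rest, heq, hnb⟩
  · simp [h, extrLoopA_nil, pvTakeWhile_nil]
  · rw [heq]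
    have hnb : ¬ (PySem.Chars.strip x).isEmpty := by simpa using hnb
    by_cases h1 : PySem.Chars.startswith (PySem.Chars.strip x) ['#']
    · have hc : pvIsComment x = true := by simp [pvIsComment, hnb, h1]
      simp [extrLoopA_cons, pvTakeWhile_cons, hnb, h1, hc, pvNormalize,
        extrLoopA_run rest [PySem.Chars.strip (pvLstrip (PySem.Chars.strip x) ['#', ' '])] (by simp)]
    · by_cases h2 : PySem.Chars.startswith (PySem.Chars.strip x) ['/', '/']
      · have hc : pvIsComment x = true := by simp [pvIsComment, hnb, h2]
        simp [extrLoopA_cons, pvTakeWhile_cons, hnb, h1, h2, hc, pvNormalize,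
          extrLoopA_run rest [PySem.Chars.strip (pvLstrip (PySem.Chars.strip x) ['/', ' '])] (by simp)]
      · by_cases h3 : PySem.Chars.startswith (PySem.Chars.strip x) ['/', '*']
        · have hc : pvIsComment x = true := by simp [pvIsComment, hnb, h3]
          simp [extrLoopA_cons, pvTakeWhile_cons, hnb, h1, h2, h3, hc, pvNormalize,
            extrLoopA_run rest [PySem.Chars.strip (pvRstrip (pvLstrip (PySem.Chars.strip x) ['/', '*', ' ']) [' ', '*', '/'])] (by simp)]
        · by_cases h4 : PySem.Chars.startswith (PySem.Chars.strip x) ['*']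
          · have hc : pvIsComment x = true := by simp [pvIsComment, hnb, h4]
            simp [extrLoopA_cons, pvTakeWhile_cons, hnb, h1, h2, h3, h4, hc, pvNormalize,
              extrLoopA_run rest [PySem.Chars.strip (pvLstrip (PySem.Chars.strip x) ['*', ' '])] (by simp)]
          · have hc : pvIsComment x = false := by simp [pvIsComment, hnb, h1, h2, h3, h4]
            simp [extrLoopA_cons, pvTakeWhile_cons, hnb, h1, h2, h3, h4, hc]

-- ===== VERDICT (by name: the statement is the Claim_ definition above) =====
theorem extract_leading_comment_py_spec : Claim_equal_extract_leading_comment_py := by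
  intro text language _
  show _ = _
  simp only [extract_leading_comment_py, extract_leading_comment_py_alt, extrLoopA_eq_block]
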